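-- pv_equiv track=rewrite | github.com/Kam300/famalyone | face_recognition_server/pdf_server.py | group_by_generation
-- ===== SOURCE A (Python) =====
-- def group_by_generation(members):
--     gens = {
--         'grandparents': [], 'parents': [], 'uncles': [],
--         'children': [], 'nephews': [], 'grandchildren': [], 'other': []
--     }
--
--     role_map = {
--         'GRANDFATHER': 'grandparents', 'GRANDMOTHER': 'grandparents',
--         'FATHER': 'parents', 'MOTHER': 'parents',
--         'UNCLE': 'uncles', 'AUNT': 'uncles',
--         'SON': 'children', 'DAUGHTER': 'children',
--         'BROTHER': 'children', 'SISTER': 'children',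
--         'NEPHEW': 'nephews', 'NIECE': 'nephews',
--         'GRANDSON': 'grandchildren', 'GRANDDAUGHTER': 'grandchildren',
--         'OTHER': 'other'
--     }
--
--     for member in members:
--         role = member.get('role', 'OTHER')
--         gen = role_map.get(role, 'other')
--         gens[gen].append(member)
--
--     # Группируем пары (муж+жена) вместе
--     for gen_key in gens:
--         gens[gen_key] = sort_as_couples(gens[gen_key], members)
--
--     return gens
--
-- def sort_as_couples(gen_members, all_members):
--     """Сортирует членов поколения парами (муж+жена рядом)"""
--     if len(gen_members) <= 1:
--         return gen_members
--
--     # Находим пары через общих детей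
--     couples = find_couples(gen_members, all_members)
--
--     result = []
--     used_ids = set()
--
--     # Сначала добавляем пары
--     for m_id, f_id in couples:
--         male = next((m for m in gen_members if m.get('id') == m_id), None)
--         female = next((m for m in gen_members if m.get('id') == f_id), None)
--
--         if male and male.get('id') not in used_ids:
--             result.append(male)
--             used_ids.add(male.get('id'))
--         if female and female.get('id') not in used_ids:
--             result.append(female)
--             used_ids.add(female.get('id'))
--
--     # Добавляем оставшихся (одиночек), сортируя мужчин перед женщинами
--     remaining = [m for m in gen_members if m.get('id') not in used_ids]
--     remaining.sort(key=lambda m: get_gender_order(m.get('role', 'OTHER')))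
--     result.extend(remaining)
--
--     return result
--
-- def find_couples(gen_members, all_members):
--     """Находит пары (муж+жена) через общих детей"""
--     couples = []
--     member_ids = {m.get('id') for m in gen_members}
--
--     # Ищем детей, у которых оба родителя в этом поколении
--     for member in all_members:
--         father_id = member.get('fatherId')
--         mother_id = member.get('motherId')
--
--         if father_id and mother_id:
--             if father_id in member_ids and mother_id in member_ids:
--                 couple = (father_id, mother_id)
--                 if couple not in couples:
--                     couples.append(couple)
--
--     # Если не нашли через детей, группируем по ролям (дедушка+бабушка, отец+мать)
--     if not couples:
--         males = [m for m in gen_members if get_gender_order(m.get('role', 'OTHER')) == 1]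
--         females = [m for m in gen_members if get_gender_order(m.get('role', 'OTHER')) == 2]
--
--         # Создаём пары по порядку
--         for i, male in enumerate(males):
--             if i < len(females):
--                 couples.append((male.get('id'), females[i].get('id')))
--
--     return couples
--
-- def get_gender_order(role):
--     """Возвращает порядок: 1 - мужской, 2 - женский, 3 - другое"""
--     male_roles = {'GRANDFATHER', 'FATHER', 'SON', 'BROTHER', 'UNCLE', 'NEPHEW', 'GRANDSON'}
--     female_roles = {'GRANDMOTHER', 'MOTHER', 'DAUGHTER', 'SISTER', 'AUNT', 'NIECE', 'GRANDDAUGHTER'}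
--
--     if role in male_roles:
--         return 1
--     elif role in female_roles:
--         return 2
--     return 3
-- ===== SOURCE B (Python) =====
-- # B: same bucketing/couple discovery, but one stable key-sort per generation
-- # (couple members keyed by first-occurrence rank, singles by gender) instead of
-- # the imperative result/used_ids construction plus a separate remaining.sort.
--
-- def group_by_generation(members):
--     role_map = {
--         'GRANDFATHER': 'grandparents', 'GRANDMOTHER': 'grandparents',
--         'FATHER': 'parents', 'MOTHER': 'parents',
--         'UNCLE': 'uncles', 'AUNT': 'uncles',
--         'SON': 'children', 'DAUGHTER': 'children',
--         'BROTHER': 'children', 'SISTER': 'children',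
--         'NEPHEW': 'nephews', 'NIECE': 'nephews',
--         'GRANDSON': 'grandchildren', 'GRANDDAUGHTER': 'grandchildren',
--         'OTHER': 'other'
--     }
--     keys = ['grandparents', 'parents', 'uncles', 'children',
--             'nephews', 'grandchildren', 'other']
--     return {
--         k: couple_sorted(
--             [m for m in members
--              if role_map.get(m.get('role', 'OTHER'), 'other') == k],
--             members)
--         for k in keys
--     }
--
-- def couple_sorted(gen_members, all_members):
--     """One stable sort: couple members first (in couple order), then singles."""
--     rank = {}
--     for f_id, m_id in find_couples(gen_members, all_members):
--         if f_id not in rank: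
--             rank[f_id] = len(rank)
--         if m_id not in rank:
--             rank[m_id] = len(rank)
--
--     def key(m):
--         i = m.get('id')
--         if i in rank:
--             return (0, rank[i])
--         return (1, get_gender_order(m.get('role', 'OTHER')))
--
--     return sorted(gen_members, key=key)
--
-- def find_couples(gen_members, all_members):
--     """Находит пары (муж+жена) через общих детей"""
--     couples = []
--     member_ids = {m.get('id') for m in gen_members}
--
--     for member in all_members:
--         father_id = member.get('fatherId')
--         mother_id = member.get('motherId')
--
--         if father_id and mother_id:
--             if father_id in member_ids and mother_id in member_ids:
--                 couple = (father_id, mother_id)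
--                 if couple not in couples:
--                     couples.append(couple)
--
--     if not couples:
--         males = [m for m in gen_members if get_gender_order(m.get('role', 'OTHER')) == 1]
--         females = [m for m in gen_members if get_gender_order(m.get('role', 'OTHER')) == 2]
--         for i, male in enumerate(males):
--             if i < len(females):
--                 couples.append((male.get('id'), females[i].get('id')))
--
--     return couples
--
-- def get_gender_order(role):
--     male_roles = {'GRANDFATHER', 'FATHER', 'SON', 'BROTHER', 'UNCLE', 'NEPHEW', 'GRANDSON'}
--     female_roles = {'GRANDMOTHER', 'MOTHER', 'DAUGHTER', 'SISTER', 'AUNT', 'NIECE', 'GRANDDAUGHTER'}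
--     if role in male_roles:
--         return 1
--     elif role in female_roles:
--         return 2
--     return 3
-- ===== Notes on version B (the rewrite author's own statement) =====
-- stated objective: alternative
-- what changed: sort_as_couples's imperative two-phase construction (next()-lookups per couple into a result list guarded by a used_ids set, then a separately sorted remainder) is replaced by computing a first-occurrence rank for each couple id and doing one stable key-sort of the whole bucket (coupled members keyed (0, rank), singles keyed (1, gender)); the bucketing loop becomes one filter per fixed generation key. …
import Mathlib
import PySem

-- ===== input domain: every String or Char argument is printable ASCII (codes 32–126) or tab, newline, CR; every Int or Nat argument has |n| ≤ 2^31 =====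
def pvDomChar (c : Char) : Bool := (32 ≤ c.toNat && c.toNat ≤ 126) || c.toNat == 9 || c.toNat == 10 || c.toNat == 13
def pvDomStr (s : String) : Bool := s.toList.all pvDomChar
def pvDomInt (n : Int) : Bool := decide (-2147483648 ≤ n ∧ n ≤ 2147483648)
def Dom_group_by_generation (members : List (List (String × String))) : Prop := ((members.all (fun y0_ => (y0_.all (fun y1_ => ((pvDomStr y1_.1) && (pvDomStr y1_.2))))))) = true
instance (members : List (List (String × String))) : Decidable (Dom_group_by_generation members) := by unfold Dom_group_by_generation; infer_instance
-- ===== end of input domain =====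

-- B replaces A's imperative two-phase bucket ordering (next()-lookups guarded by a
-- used_ids set, then a separately sorted remainder) with a first-occurrence rank
-- dict plus ONE stable key-sort per generation; equal on Pre_ (distinct present
-- ids, gendered members carry an id).

-- Shared helpers: both Source A and Source B contain the identical get_gender_order and
-- find_couples, and both look keys up in the same member dicts / role_map.
abbrev PvMember := List (String × String)

-- dict(m).get(k) — members arrive as key/value lists; Python sees dict(m) (last
-- duplicate key wins), which is PySem.Dict.ofList.
def pvMGet (m : PvMember) (k : String) : Option String := (PySem.Dict.ofList m).get? k

def pvMemberId (m : PvMember) : Option String := pvMGet m "id"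

def pvRoleOf (m : PvMember) : String := ((PySem.Dict.ofList m).getD "role" "OTHER")

def pvGenderOrder (role : String) : Int :=
  if (PySem.Set.ofList ["GRANDFATHER", "FATHER", "SON", "BROTHER", "UNCLE", "NEPHEW", "GRANDSON"]).contains role then 1
  else if (PySem.Set.ofList ["GRANDMOTHER", "MOTHER", "DAUGHTER", "SISTER", "AUNT", "NIECE", "GRANDDAUGHTER"]).contains role then 2
  else 3

def pvRoleMap : PySem.Dict String String := PySem.Dict.ofList
  [("GRANDFATHER", "grandparents"), ("GRANDMOTHER", "grandparents"),
   ("FATHER", "parents"), ("MOTHER", "parents"),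
   ("UNCLE", "uncles"), ("AUNT", "uncles"),
   ("SON", "children"), ("DAUGHTER", "children"),
   ("BROTHER", "children"), ("SISTER", "children"),
   ("NEPHEW", "nephews"), ("NIECE", "nephews"),
   ("GRANDSON", "grandchildren"), ("GRANDDAUGHTER", "grandchildren"),
   ("OTHER", "other")]

def pvRoleGen (m : PvMember) : String := pvRoleMap.getD (pvRoleOf m) "other"

-- Python truthiness of m.get(k): None and '' are falsy.
def pvTruthy : Option String → Bool
  | none => false
  | some s => decide (s ≠ "")

-- find_couples (identical in Source A and Source B)
def pvFindCouples (gen_members all_members : List PvMember) : List (Option String × Option String) :=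
  let memberIds : PySem.Set (Option String) := PySem.Set.ofList (gen_members.map pvMemberId)
  let couples := all_members.foldl (fun cs member =>
    let father_id := pvMGet member "fatherId"
    let mother_id := pvMGet member "motherId"
    if pvTruthy father_id && pvTruthy mother_id then
      if memberIds.contains father_id && memberIds.contains mother_id then
        if !(cs.contains (father_id, mother_id)) then cs ++ [(father_id, mother_id)] else cs
      else cs
    else cs) []
  if couples.isEmpty then
    let males := gen_members.filter (fun m => pvGenderOrder (pvRoleOf m) == 1)
    let females := gen_members.filter (fun m => pvGenderOrder (pvRoleOf m) == 2)
    (PySem.List.enumerate males).foldl (fun cs p =>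
      if p.1 < (females.length : Int) then
        cs ++ [(pvMemberId p.2, pvMemberId (PySem.List.pyGetD females p.1 []))]
      else cs) []
  else couples

-- the loop bodies of sort_as_couples' couple pass and couple_sorted's rank pass,
-- as named helpers
def pvCoupleStep (gen_members : List PvMember) (st : List PvMember × PySem.Set (Option String))
    (c : Option String × Option String) : List PvMember × PySem.Set (Option String) :=
  let male := gen_members.find? (fun m => pvMemberId m == c.1)
  let female := gen_members.find? (fun m => pvMemberId m == c.2)
  let st1 := match male with
    | some m => if !m.isEmpty && !(st.2.contains (pvMemberId m)) then
                  (st.1 ++ [m], st.2.add (pvMemberId m)) else st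
    | none => st
  match female with
    | some m => if !m.isEmpty && !(st1.2.contains (pvMemberId m)) then
                  (st1.1 ++ [m], st1.2.add (pvMemberId m)) else st1
    | none => st1

def pvRankStep (r : PySem.Dict (Option String) Int) (c : Option String × Option String) :
    PySem.Dict (Option String) Int :=
  let r := if r.contains c.1 then r else r.insert c.1 (r.size : Int)
  if r.contains c.2 then r else r.insert c.2 (r.size : Int)

-- ===== PORT A =====
-- sort_as_couples: 'if male' is Python dict truthiness (non-empty dict), hence !m.isEmpty.
def pvSortAsCouples (gen_members all_members : List PvMember) : List PvMember :=
  if gen_members.length ≤ 1 then gen_members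
  else
    let couples := pvFindCouples gen_members all_members
    let st := couples.foldl (pvCoupleStep gen_members) ([], PySem.Set.empty)
    let remaining := gen_members.filter (fun m => !(st.2.contains (pvMemberId m)))
    st.1 ++ PySem.List.sorted remaining (fun m => pvGenderOrder (pvRoleOf m)) false

-- gens[gen].append(member) = modify (the key is always one of the seven, so the
-- default [] of modify is never used and no KeyError is reachable).
def group_by_generation (members : List (List (String × String))) : List (String × List (List (String × String))) :=
  let gens : PySem.Dict String (List PvMember) := PySem.Dict.ofList
    [("grandparents", []), ("parents", []), ("uncles", []),
     ("children", []), ("nephews", []), ("grandchildren", []), ("other", [])]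
  let gens := members.foldl (fun g member => g.modify (pvRoleGen member) [] (· ++ [member])) gens
  let gens := gens.keys.foldl (fun g k => g.insert k (pvSortAsCouples (g.getD k []) members)) gens
  gens.items

-- ===== PORT B =====
def pvKeys7 : List String :=
  ["grandparents", "parents", "uncles", "children", "nephews", "grandchildren", "other"]

-- couple_sorted: first-occurrence rank of each couple id, then one stable sort.
def pvCoupleSorted (gen_members all_members : List PvMember) : List PvMember :=
  let rank : PySem.Dict (Option String) Int :=
    (pvFindCouples gen_members all_members).foldl pvRankStep (PySem.Dict.ofList [])
  PySem.List.sorted2 gen_members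
    (fun m => if rank.contains (pvMemberId m) then (0 : Int) else 1)
    (fun m => match rank.get? (pvMemberId m) with
      | some n => n
      | none => pvGenderOrder (pvRoleOf m)) false

-- {k: couple_sorted(...) for k in keys}: a dict comprehension over seven distinct
-- literal keys is exactly this association list, in key order.
def group_by_generation_alt (members : List (List (String × String))) : List (String × List (List (String × String))) :=
  pvKeys7.map (fun k =>
    (k, pvCoupleSorted (members.filter (fun m => pvRoleGen m == k)) members))

-- ===== PRECONDITION & SPEC =====
-- Pre_ excludes lists where two members share a present 'id' or where a member
-- with a male/female role lacks an 'id': there A's next()-first-match plus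
-- used_ids dedup silently drops or swaps members (an accident of the imperative
-- construction), which a single stable sort keeps intact.
def Pre_group_by_generation (members : List (List (String × String))) : Prop :=
  ((members.map pvMemberId).filter Option.isSome).Nodup ∧
  ∀ m ∈ members, pvGenderOrder (pvRoleOf m) ≠ 3 → (pvMemberId m).isSome

instance (members : List (List (String × String))) : Decidable (Pre_group_by_generation members) := by
  unfold Pre_group_by_generation; infer_instance

def pvWitness_group_by_generation : (List (List (String × String))) :=
  [[("id", "1"), ("role", "FATHER")], [("id", "2"), ("role", "MOTHER")],
   [("id", "3"), ("role", "SON"), ("fatherId", "1"), ("motherId", "2")], [("note", "x")]]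

def Spec_group_by_generation (members : List (List (String × String))) (out : List (String × List (List (String × String)))) : Prop := out = group_by_generation_alt members
instance (members : List (List (String × String))) (out : List (String × List (List (String × String)))) : Decidable (Spec_group_by_generation members out) := by unfold Spec_group_by_generation; infer_instance

-- ===== CLAIM (what is proved, stated in full; the proofs are below) =====
def Claim_equal_group_by_generation : Prop := ∀ (members : List (List (String × String))), Dom_group_by_generation members → Pre_group_by_generation members → Spec_group_by_generation members (group_by_generation members)

-- ===== LEMMAS AND PROOFS =====

-- insertion sort with an explicit comparator (the shape both PySem.List.sorted
-- and PySem.List.sorted2 reduce to)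
def pvIsort {α : Type} (before : α → α → Bool) (xs : List α) : List α :=
  xs.foldl (fun acc x => PySem.List.insertBy before x acc) []

theorem pvSorted_eq_isort {α κ : Type} [LT κ] [DecidableLT κ] (xs : List α) (key : α → κ) :
    PySem.List.sorted xs key false = pvIsort (fun a b => decide (key a < key b)) xs := rfl

theorem pvSorted2_eq_isort {α κ₁ κ₂ : Type} [LT κ₁] [DecidableLT κ₁] [LT κ₂] [DecidableLT κ₂]
    (xs : List α) (k1 : α → κ₁) (k2 : α → κ₂) :
    PySem.List.sorted2 xs k1 k2 false =
      pvIsort (fun a b => decide (k1 a < k1 b) || (!decide (k1 b < k1 a) && decide (k2 a < k2 b))) xs := rfl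

theorem pvInsertBy_append_of_all_before {α : Type} (before : α → α → Bool) (x : α)
    (l1 l2 : List α) (h : ∀ y ∈ l2, before x y = true) :
    PySem.List.insertBy before x (l1 ++ l2) = PySem.List.insertBy before x l1 ++ l2 := by
  induction l1 with
  | nil =>
    cases l2 with
    | nil => rfl
    | cons y t => simp [PySem.List.insertBy, h y (by simp)]
  | cons a l1 ih =>
    by_cases hb : before x a
    · simp [PySem.List.insertBy, hb]
    · simp [PySem.List.insertBy, hb, ih]

theorem pvInsertBy_append_of_all_not_before {α : Type} (before : α → α → Bool) (x : α)
    (l1 l2 : List α) (h : ∀ y ∈ l1, before x y = false) :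
    PySem.List.insertBy before x (l1 ++ l2) = l1 ++ PySem.List.insertBy before x l2 := by
  induction l1 with
  | nil => rfl
  | cons a l1 ih =>
    have ha : before x a = false := h a (by simp)
    simp [PySem.List.insertBy, ha]
    exact ih (fun y hy => h y (by simp [hy]))


theorem pvIsort_split_aux {α : Type} (before : α → α → Bool) (p : α → Bool)
    (h : ∀ a b, p a = true → p b = false → before a b = true ∧ before b a = false) :
    ∀ (xs accP accQ : List α), (∀ a ∈ accP, p a = true) → (∀ b ∈ accQ, p b = false) →
    xs.foldl (fun acc x => PySem.List.insertBy before x acc) (accP ++ accQ) =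
      (xs.filter p).foldl (fun acc x => PySem.List.insertBy before x acc) accP ++
      (xs.filter (fun a => !p a)).foldl (fun acc x => PySem.List.insertBy before x acc) accQ := by
  intro xs
  induction xs with
  | nil => intro accP accQ _ _; simp
  | cons x t ih =>
    intro accP accQ hP hQ
    by_cases hp : p x
    · have hstep : PySem.List.insertBy before x (accP ++ accQ) =
          PySem.List.insertBy before x accP ++ accQ :=
        pvInsertBy_append_of_all_before before x accP accQ
          (fun y hy => (h x y hp (hQ y hy)).1)
      have hP' : ∀ a ∈ PySem.List.insertBy before x accP, p a = true := by
        intro a ha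
        rcases (PySem.List.mem_insertBy before x a accP).mp ha with h' | h'
        · simpa [h'] using hp
        · exact hP a h'
      simp only [List.foldl_cons, hstep, List.filter_cons, hp]
      simpa using ih (PySem.List.insertBy before x accP) accQ hP' hQ
    · have hpf : p x = false := Bool.eq_false_iff.mpr hp
      have hstep : PySem.List.insertBy before x (accP ++ accQ) =
          accP ++ PySem.List.insertBy before x accQ :=
        pvInsertBy_append_of_all_not_before before x accP accQ
          (fun y hy => (h y x (hP y hy) hpf).2)
      have hQ' : ∀ b ∈ PySem.List.insertBy before x accQ, p b = false := by
        intro b hb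
        rcases (PySem.List.mem_insertBy before x b accQ).mp hb with h' | h'
        · simpa [h'] using hpf
        · exact hQ b h'
      simp only [List.foldl_cons, hstep, List.filter_cons, hpf]
      simpa using ih accP (PySem.List.insertBy before x accQ) hP hQ'

theorem pvIsort_split {α : Type} (before : α → α → Bool) (p : α → Bool) (xs : List α)
    (h : ∀ a b, p a = true → p b = false → before a b = true ∧ before b a = false) :
    pvIsort before xs = pvIsort before (xs.filter p) ++ pvIsort before (xs.filter (fun a => !p a)) := by
  simpa using pvIsort_split_aux before p h xs [] [] (by simp) (by simp)

theorem pvInsertBy_congr {α : Type} (before before' : α → α → Bool) (x : α) (ys : List α)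
    (h : ∀ b ∈ ys, before x b = before' x b) :
    PySem.List.insertBy before x ys = PySem.List.insertBy before' x ys := by
  induction ys with
  | nil => rfl
  | cons y t ih =>
    have hy : before x y = before' x y := h y (by simp)
    by_cases hb : before' x y
    · simp [PySem.List.insertBy, hb, hy ▸ hb]
    · have : before x y = false := by rw [hy]; exact Bool.eq_false_iff.mpr hb
      simp [PySem.List.insertBy, this, Bool.eq_false_iff.mpr hb]
      exact ih (fun b hb' => h b (by simp [hb']))

theorem pvIsort_congr {α : Type} (before before' : α → α → Bool) (xs : List α)
    (h : ∀ a ∈ xs, ∀ b ∈ xs, before a b = before' a b) :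
    pvIsort before xs = pvIsort before' xs := by
  have aux : ∀ (S : α → Prop) (ys acc : List α), (∀ a ∈ acc, S a) → (∀ a ∈ ys, S a) →
      (∀ a b, S a → S b → before a b = before' a b) →
      ys.foldl (fun acc x => PySem.List.insertBy before x acc) acc =
        ys.foldl (fun acc x => PySem.List.insertBy before' x acc) acc := by
    intro S ys
    induction ys with
    | nil => intro acc _ _ _; rfl
    | cons y t ih =>
      intro acc hacc hys hS
      have hy : S y := hys y (by simp)
      have hstep : PySem.List.insertBy before y acc = PySem.List.insertBy before' y acc :=
        pvInsertBy_congr before before' y acc (fun b hb => hS y b hy (hacc b hb))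
      have hacc' : ∀ a ∈ PySem.List.insertBy before' y acc, S a := by
        intro a ha
        rcases (PySem.List.mem_insertBy before' y a acc).mp ha with h' | h'
        · exact h' ▸ hy
        · exact hacc a h'
      simp only [List.foldl_cons, hstep]
      exact ih _ hacc' (fun a ha => hys a (by simp [ha])) hS
  exact aux (fun a => a ∈ xs) xs [] (by simp) (fun a ha => ha) (fun a b ha hb => h a ha b hb)

-- the ordered set of couple ids (exactly the used_ids insertion sequence of A
-- and the key insertion sequence of B's rank dict)
def pvFlatIds (couples : List (Option String × Option String)) (s : PySem.Set (Option String)) :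
    PySem.Set (Option String) :=
  couples.foldl (fun t c => (t.add c.1).add c.2) s

-- the rank dict over an id list, keys in order, values 0,1,2,…
def pvMkRank (l : List (Option String)) (start : Int) : PySem.Dict (Option String) Int :=
  PySem.Dict.mk ((PySem.List.enumerate l start).map (fun p => (p.2, p.1)))

theorem pvContains_mkRank (l : List (Option String)) (s : Int) (i : Option String) :
    (pvMkRank l s).contains i = decide (i ∈ l) := by
  induction l generalizing s with
  | nil => simp [pvMkRank, PySem.Dict.contains, PySem.List.enumerate]
  | cons x t ih =>
    simp only [pvMkRank, PySem.List.enumerate_cons, List.map_cons, PySem.Dict.contains,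
      List.any_cons] at *
    by_cases hx : x = i
    · simp [hx]
    · simp [hx, ih (s + 1), Ne.symm hx]

theorem pvSize_mkRank (l : List (Option String)) (s : Int) : (pvMkRank l s).size = l.length := by
  simp [pvMkRank, PySem.Dict.size, PySem.List.length_enumerate]

theorem pvInsert_mkRank (l : List (Option String)) (s : Int) (i : Option String) (h : i ∉ l) :
    (pvMkRank l s).insert i (s + l.length) = pvMkRank (l ++ [i]) s := by
  have hc : (pvMkRank l s).contains i = false := by
    simp [pvContains_mkRank, h]
  simp only [PySem.Dict.insert, hc, Bool.false_eq_true, if_false]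
  simp [pvMkRank, PySem.List.enumerate_append, PySem.List.enumerate]

theorem pvGet?_mkRank_getElem (l : List (Option String)) (s : Int) (hn : l.Nodup)
    (j : Nat) (hj : j < l.length) : (pvMkRank l s).get? l[j] = some (s + j) := by
  induction l generalizing s j with
  | nil => simp at hj
  | cons x t ih =>
    cases j with
    | zero =>
      simp [pvMkRank, PySem.List.enumerate_cons, PySem.Dict.get?]
    | succ j =>
      have hx : x ∉ t := (List.nodup_cons.mp hn).1
      have hj' : j < t.length := by simpa using hj
      have hne : (x == (x :: t)[j + 1]) = false := by
        have he : (x :: t)[j + 1] = t[j]'hj' := by simp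
        rw [he]
        simp only [beq_eq_false_iff_ne, ne_eq]
        intro hxe
        exact hx (hxe ▸ List.getElem_mem _)
      have hih := ih (s + 1) (List.nodup_cons.mp hn).2 j (by simpa using hj)
      simp only [pvMkRank, PySem.List.enumerate_cons, List.map_cons, PySem.Dict.get?,
        List.find?_cons] at hih ⊢
      simp only [hne]
      simpa [add_assoc, add_comm, add_left_comm] using hih


-- B's rank fold is pvMkRank of the flattened-dedup id list
theorem pvAdd_mkRank (l : List (Option String)) (i : Option String) :
    (if (pvMkRank l 0).contains i then pvMkRank l 0
     else (pvMkRank l 0).insert i ((pvMkRank l 0).size : Int)) =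
      pvMkRank (PySem.Set.add l i) 0 := by
  by_cases h : i ∈ l
  · have hadd : PySem.Set.add l i = l := by
      simp only [PySem.Set.add, PySem.Set.contains_eq_decide, decide_eq_true h, if_true]
    rw [pvContains_mkRank, decide_eq_true h, hadd]
    simp
  · have hadd : PySem.Set.add l i = l ++ [i] := by
      simp only [PySem.Set.add, PySem.Set.contains_eq_decide, decide_eq_false h,
        Bool.false_eq_true, if_false]
    rw [pvContains_mkRank, decide_eq_false h]
    simp only [Bool.false_eq_true, if_false]
    rw [pvSize_mkRank]
    have hins := pvInsert_mkRank l 0 i h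
    rw [zero_add] at hins
    rw [hins, hadd]

theorem pvRank_char (couples : List (Option String × Option String)) (l : List (Option String)) :
    couples.foldl pvRankStep (pvMkRank l 0) = pvMkRank (pvFlatIds couples l) 0 := by
  induction couples generalizing l with
  | nil => simp [pvFlatIds]
  | cons c cs ih =>
    simp only [List.foldl_cons, pvRankStep]
    rw [pvAdd_mkRank l c.1, pvAdd_mkRank (PySem.Set.add l c.1) c.2,
      ih (PySem.Set.add (PySem.Set.add l c.1) c.2)]
    rfl

def pvGoodId (gen : List PvMember) (i : Option String) : Prop :=
  i.isSome = true ∧ ∃ m ∈ gen, pvMemberId m = i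

theorem pvNodup_flatIds (couples : List (Option String × Option String))
    (s : PySem.Set (Option String)) (hs : s.Nodup) : (pvFlatIds couples s).Nodup := by
  induction couples generalizing s with
  | nil => exact hs
  | cons c cs ih =>
    exact ih _ (PySem.Set.nodup_add _ _ (PySem.Set.nodup_add _ _ hs))

theorem pvMem_flatIds (couples : List (Option String × Option String))
    (s : PySem.Set (Option String)) (i : Option String) (h : i ∈ pvFlatIds couples s) :
    i ∈ s ∨ ∃ c ∈ couples, i = c.1 ∨ i = c.2 := by
  induction couples generalizing s with
  | nil => exact Or.inl h
  | cons c cs ih =>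
    rcases ih _ h with h' | h'
    · rcases (PySem.Set.mem_add _ _ _).mp h' with h'' | h''
      · rcases (PySem.Set.mem_add _ _ _).mp h'' with h3 | h3
        · exact Or.inl h3
        · exact Or.inr ⟨c, by simp, Or.inl h3⟩
      · exact Or.inr ⟨c, by simp, Or.inr h''⟩
    · obtain ⟨c', hc', hor⟩ := h'
      exact Or.inr ⟨c', by simp [hc'], hor⟩

theorem pvGood_findCouples (gen all : List PvMember)
    (P2 : ∀ m ∈ gen, pvGenderOrder (pvRoleOf m) ≠ 3 → (pvMemberId m).isSome = true) :
    ∀ c ∈ pvFindCouples gen all, pvGoodId gen c.1 ∧ pvGoodId gen c.2 := by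
  intro c hc
  unfold pvFindCouples at hc
  simp only at hc
  set memberIds : PySem.Set (Option String) := PySem.Set.ofList (gen.map pvMemberId) with hmids
  have hmem_ids : ∀ i, i ∈ memberIds → ∃ m ∈ gen, pvMemberId m = i := by
    intro i hi
    rw [hmids, PySem.Set.mem_ofList] at hi
    obtain ⟨m, hm, hmi⟩ := List.mem_map.mp hi
    exact ⟨m, hm, hmi⟩
  -- the children loop only accumulates good couples
  have hloop : ∀ (alls : List PvMember) (acc : List (Option String × Option String)),
      (∀ c' ∈ acc, pvGoodId gen c'.1 ∧ pvGoodId gen c'.2) →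
      ∀ c' ∈ alls.foldl (fun cs member =>
        let father_id := pvMGet member "fatherId"
        let mother_id := pvMGet member "motherId"
        if pvTruthy father_id && pvTruthy mother_id then
          if memberIds.contains father_id && memberIds.contains mother_id then
            if !(cs.contains (father_id, mother_id)) then cs ++ [(father_id, mother_id)] else cs
          else cs
        else cs) acc, pvGoodId gen c'.1 ∧ pvGoodId gen c'.2 := by
    intro alls
    induction alls with
    | nil => intro acc hacc c' hc'; exact hacc c' hc'
    | cons a t ih =>
      intro acc hacc c' hc'
      refine ih _ ?_ c' hc'
      intro c'' hc''
      simp only at hc''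
      split at hc''
      · split at hc''
        · split at hc''
          · rcases List.mem_append.mp hc'' with h' | h'
            · exact hacc _ h'
            · rename_i htruthy hmem _
              have h1 : pvTruthy (pvMGet a "fatherId") = true := (Bool.and_eq_true_iff.mp htruthy).1
              have h2 : pvTruthy (pvMGet a "motherId") = true := (Bool.and_eq_true_iff.mp htruthy).2
              have hm1 : memberIds.contains (pvMGet a "fatherId") = true := (Bool.and_eq_true_iff.mp hmem).1
              have hm2 : memberIds.contains (pvMGet a "motherId") = true := (Bool.and_eq_true_iff.mp hmem).2
              have hc1 : c'' = (pvMGet a "fatherId", pvMGet a "motherId") := by simpa using h'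
              subst hc1
              constructor
              · refine ⟨?_, hmem_ids _ ((PySem.Set.contains_iff _ _).mp hm1)⟩
                cases hh : pvMGet a "fatherId" with
                | none => rw [hh] at h1; simp [pvTruthy] at h1
                | some v => rfl
              · refine ⟨?_, hmem_ids _ ((PySem.Set.contains_iff _ _).mp hm2)⟩
                cases hh : pvMGet a "motherId" with
                | none => rw [hh] at h2; simp [pvTruthy] at h2
                | some v => rfl
          · exact hacc _ hc''
        · exact hacc _ hc''
      · exact hacc _ hc''
  split at hc
  · -- fallback branch: pairs of gendered members of gen
    rename_i hempty
    set males := gen.filter (fun m => pvGenderOrder (pvRoleOf m) == 1) with hmales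
    set females := gen.filter (fun m => pvGenderOrder (pvRoleOf m) == 2) with hfemales
    have hgend : ∀ m ∈ males, m ∈ gen ∧ (pvMemberId m).isSome = true := by
      intro m hm
      have := List.mem_filter.mp (hmales ▸ hm)
      refine ⟨this.1, P2 m this.1 ?_⟩
      have h1 : pvGenderOrder (pvRoleOf m) = 1 := by simpa using this.2
      omega
    have hgendf : ∀ m ∈ females, m ∈ gen ∧ (pvMemberId m).isSome = true := by
      intro m hm
      have := List.mem_filter.mp (hfemales ▸ hm)
      refine ⟨this.1, P2 m this.1 ?_⟩
      have h1 : pvGenderOrder (pvRoleOf m) = 2 := by simpa using this.2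
      omega
    have hloop2 : ∀ (es : List (Int × PvMember)) (acc : List (Option String × Option String)),
        (∀ c' ∈ acc, pvGoodId gen c'.1 ∧ pvGoodId gen c'.2) →
        (∀ p ∈ es, p.2 ∈ males ∧ 0 ≤ p.1) →
        ∀ c' ∈ es.foldl (fun cs p =>
          if p.1 < (females.length : Int) then
            cs ++ [(pvMemberId p.2, pvMemberId (PySem.List.pyGetD females p.1 []))]
          else cs) acc, pvGoodId gen c'.1 ∧ pvGoodId gen c'.2 := by
      intro es
      induction es with
      | nil => intro acc hacc _ c' hc'; exact hacc c' hc'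
      | cons e t ih =>
        intro acc hacc hes c' hc'
        refine ih _ ?_ (fun p hp => hes p (by simp [hp])) c' hc'
        intro c'' hc''
        simp only at hc''
        split at hc''
        · rcases List.mem_append.mp hc'' with h' | h'
          · exact hacc _ h'
          · rename_i hlt
            have he := hes e (by simp)
            have hc1 : c'' = (pvMemberId e.2, pvMemberId (PySem.List.pyGetD females e.1 [])) := by
              simpa using h'
            subst hc1
            have hm := hgend e.2 he.1
            have hfem : PySem.List.pyGetD females e.1 [] ∈ females := by
              rw [PySem.List.pyGetD_of_nonneg females [] he.2]
              have hlt' : e.1.toNat < females.length := by omega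
              rw [List.getD_eq_getElem females [] hlt']
              exact List.getElem_mem _
            have hf := hgendf _ hfem
            exact ⟨⟨hm.2, e.2, hm.1, rfl⟩, ⟨hf.2, _, hf.1, rfl⟩⟩
        · exact hacc _ hc''
    exact hloop2 _ [] (by simp) (by
      intro p hp
      obtain ⟨k, hk, hpe⟩ := (PySem.List.mem_enumerate_iff _ _ _).mp hp
      subst hpe
      exact ⟨List.getElem_mem _, by simp⟩) c hc
  · exact hloop all [] (by simp) c hc

theorem pvNonempty_of_id (m : PvMember) (hs : (pvMemberId m).isSome = true) :
    m.isEmpty = false := by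
  cases m with
  | nil => simp [pvMemberId, pvMGet, PySem.Dict.ofList, PySem.Dict.get?, PySem.Dict.empty, PySem.Dict.update] at hs
  | cons a t => rfl

-- under Nodup of the present ids, find? by id returns the member itself
theorem pvFind_eq_of_mem (gen : List PvMember)
    (P1 : ((gen.map pvMemberId).filter Option.isSome).Nodup)
    (m : PvMember) (hm : m ∈ gen) (hs : (pvMemberId m).isSome = true) :
    gen.find? (fun m' => pvMemberId m' == pvMemberId m) = some m := by
  induction gen with
  | nil => simp at hm
  | cons g gs ih =>
    by_cases hpred : (pvMemberId g == pvMemberId m) = true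
    · have hid : pvMemberId g = pvMemberId m := by simpa using hpred
      have hgm : g = m := by
        rcases List.mem_cons.mp hm with h' | h'
        · exact h'.symm
        · exfalso
          have hfl : ((g :: gs).map pvMemberId).filter Option.isSome =
              pvMemberId g :: ((gs.map pvMemberId).filter Option.isSome) := by
            simp [hid ▸ hs]
          rw [hfl] at P1
          have hmemid : pvMemberId m ∈ (gs.map pvMemberId).filter Option.isSome := by
            refine List.mem_filter.mpr ⟨List.mem_map.mpr ⟨m, h', rfl⟩, hs⟩
          exact (List.nodup_cons.mp P1).1 (hid ▸ hmemid)
      subst hgm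
      simp
    · have hne : g ≠ m := by
        intro he; exact hpred (by simp [he])
      have hm' : m ∈ gs := by
        rcases List.mem_cons.mp hm with h' | h'
        · exact absurd h'.symm hne
        · exact h'
      have P1' : ((gs.map pvMemberId).filter Option.isSome).Nodup := by
        have hfl : ((g :: gs).map pvMemberId).filter Option.isSome =
            if (pvMemberId g).isSome then pvMemberId g :: ((gs.map pvMemberId).filter Option.isSome)
            else (gs.map pvMemberId).filter Option.isSome := by
          simp [List.filter_cons]
        rw [hfl] at P1
        split at P1
        · exact (List.nodup_cons.mp P1).2
        · exact P1
      have hpredf : (pvMemberId g == pvMemberId m) = false := by simpa using hpred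
      simp only [List.find?_cons, hpredf]
      exact ih P1' hm'


-- A's couple loop: result = members looked up along the dedup id list, used = that list
theorem pvFoldA_char (gen : List PvMember)
    (P1 : ((gen.map pvMemberId).filter Option.isSome).Nodup)
    (couples : List (Option String × Option String))
    (hgood : ∀ c ∈ couples, pvGoodId gen c.1 ∧ pvGoodId gen c.2)
    (s : PySem.Set (Option String)) :
    couples.foldl (pvCoupleStep gen)
      (s.filterMap (fun i => gen.find? (fun m => pvMemberId m == i)), s) =
    ((pvFlatIds couples s).filterMap (fun i => gen.find? (fun m => pvMemberId m == i)),
      pvFlatIds couples s) := by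
  induction couples generalizing s with
  | nil => simp [pvFlatIds]
  | cons c cs ih =>
    obtain ⟨⟨hsome1, m1, hm1, hid1⟩, ⟨hsome2, m2, hm2, hid2⟩⟩ := hgood c (by simp)
    have hfind1 : gen.find? (fun m => pvMemberId m == c.1) = some m1 := by
      rw [← hid1]; exact pvFind_eq_of_mem gen P1 m1 hm1 (hid1 ▸ hsome1)
    have hfind2 : gen.find? (fun m => pvMemberId m == c.2) = some m2 := by
      rw [← hid2]; exact pvFind_eq_of_mem gen P1 m2 hm2 (hid2 ▸ hsome2)
    have hne1 : m1.isEmpty = false := pvNonempty_of_id m1 (hid1 ▸ hsome1)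
    have hne2 : m2.isEmpty = false := pvNonempty_of_id m2 (hid2 ▸ hsome2)
    have hstep : ∀ (t : PySem.Set (Option String)) (i : Option String) (m : PvMember),
        gen.find? (fun m' => pvMemberId m' == i) = some m →
        m.isEmpty = false → pvMemberId m = i →
        (if !m.isEmpty && !(t.contains (pvMemberId m)) then
          ((t.filterMap (fun i' => gen.find? (fun m' => pvMemberId m' == i'))) ++ [m], t.add (pvMemberId m))
         else ((t.filterMap (fun i' => gen.find? (fun m' => pvMemberId m' == i'))), t)) =
        ((t.add i).filterMap (fun i' => gen.find? (fun m' => pvMemberId m' == i')), t.add i) := by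
      intro t i m hf hem hidm
      subst hidm
      by_cases hmem : pvMemberId m ∈ t
      · have hc : t.contains (pvMemberId m) = true := (PySem.Set.contains_iff _ _).mpr hmem
        have hadd : PySem.Set.add t (pvMemberId m) = t := by
          simp only [PySem.Set.add, hc, if_true]
        rw [hem, hc]
        simp [hadd]
      · have hc : t.contains (pvMemberId m) = false := by
          cases h : t.contains (pvMemberId m)
          · rfl
          · exact absurd ((PySem.Set.contains_iff _ _).mp h) hmem
        have hadd : PySem.Set.add t (pvMemberId m) = t ++ [pvMemberId m] := by
          simp only [PySem.Set.add, hc, Bool.false_eq_true, if_false]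
        rw [hem, hc]
        simp [hadd, List.filterMap_append, hf]
    simp only [List.foldl_cons, pvCoupleStep, hfind1, hfind2]
    have h1 := hstep s c.1 m1 hfind1 hne1 hid1
    have h2 := hstep (s.add c.1) c.2 m2 hfind2 hne2 hid2
    rw [show (pvFlatIds (c :: cs) s) = pvFlatIds cs ((s.add c.1).add c.2) from rfl]
    rw [← ih (fun c' hc' => hgood c' (by simp [hc'])) ((s.add c.1).add c.2)]
    simp only [h1, h2]

-- id list of the members along the dedup couple-id list
theorem pvMapId_filterMap (gen : List PvMember)
    (P1 : ((gen.map pvMemberId).filter Option.isSome).Nodup)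
    (R : List (Option String)) (hgood : ∀ i ∈ R, pvGoodId gen i) :
    (R.filterMap (fun i => gen.find? (fun m => pvMemberId m == i))).map pvMemberId = R := by
  induction R with
  | nil => rfl
  | cons i R' ih =>
    obtain ⟨hsome, m, hm, hid⟩ := hgood i (by simp)
    have hf : gen.find? (fun m' => pvMemberId m' == i) = some m := by
      rw [← hid]; exact pvFind_eq_of_mem gen P1 m hm (hid ▸ hsome)
    simp only [List.filterMap_cons, hf, List.map_cons]
    rw [ih (fun j hj => hgood j (by simp [hj]))]
    rw [hid]

theorem pvBucket_eq (gen all : List PvMember)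
    (P1 : ((gen.map pvMemberId).filter Option.isSome).Nodup)
    (P2 : ∀ m ∈ gen, pvGenderOrder (pvRoleOf m) ≠ 3 → (pvMemberId m).isSome = true) :
    pvSortAsCouples gen all = pvCoupleSorted gen all := by
  by_cases hlen : gen.length ≤ 1
  · match gen, hlen with
    | [], _ => rfl
    | [m], _ => rfl
  · have hgood := pvGood_findCouples gen all P2
    set couples := pvFindCouples gen all with hcouples
    set R : PySem.Set (Option String) := pvFlatIds couples PySem.Set.empty with hRdef
    have hRnodup : List.Nodup R := pvNodup_flatIds couples PySem.Set.empty List.nodup_nil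
    have hRgood : ∀ i ∈ R, pvGoodId gen i := by
      intro i hi
      rcases pvMem_flatIds couples PySem.Set.empty i hi with h | ⟨c, hc, hor⟩
      · simp [PySem.Set.empty] at h
      · rcases hor with h | h
        · exact h ▸ (hgood c hc).1
        · exact h ▸ (hgood c hc).2
    have hRsome : ∀ i ∈ R, i.isSome = true := fun i hi => (hRgood i hi).1
    -- A's fold, from the empty state
    have hA : couples.foldl (pvCoupleStep gen) ([], PySem.Set.empty) =
        (R.filterMap (fun i => gen.find? (fun m => pvMemberId m == i)), R) :=
      pvFoldA_char gen P1 couples hgood PySem.Set.empty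
    -- B's rank dict
    have hB : couples.foldl pvRankStep (PySem.Dict.ofList []) = pvMkRank R 0 :=
      pvRank_char couples []
    unfold pvSortAsCouples pvCoupleSorted
    rw [if_neg hlen, ← hcouples]
    show (couples.foldl (pvCoupleStep gen) ([], PySem.Set.empty)).1 ++
        PySem.List.sorted
          (gen.filter (fun m =>
            !((couples.foldl (pvCoupleStep gen) ([], PySem.Set.empty)).2.contains (pvMemberId m))))
          (fun m => pvGenderOrder (pvRoleOf m)) false =
      PySem.List.sorted2 gen
        (fun m => if (couples.foldl pvRankStep (PySem.Dict.ofList [])).contains (pvMemberId m)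
          then (0 : Int) else 1)
        (fun m => match (couples.foldl pvRankStep (PySem.Dict.ofList [])).get? (pvMemberId m) with
          | some n => n
          | none => pvGenderOrder (pvRoleOf m)) false
    rw [hA, hB]
    simp only
    set ys := R.filterMap (fun i => gen.find? (fun m => pvMemberId m == i)) with hys
    set k1 : PvMember → Int := fun m => if (pvMkRank R 0).contains (pvMemberId m) then (0 : Int) else 1 with hk1
    set k2 : PvMember → Int := fun m => match (pvMkRank R 0).get? (pvMemberId m) with
      | some n => n
      | none => pvGenderOrder (pvRoleOf m) with hk2
    set p : PvMember → Bool := fun m => (pvMkRank R 0).contains (pvMemberId m) with hp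
    have hpdec : ∀ m, p m = decide (pvMemberId m ∈ R) := fun m => pvContains_mkRank R 0 (pvMemberId m)
    -- split B's single sort into the two classes
    rw [pvSorted2_eq_isort]
    rw [pvIsort_split _ p gen (by
      intro a b hpa hpb
      have hpa' : (pvMkRank R 0).contains (pvMemberId a) = true := hpa
      have hpb' : (pvMkRank R 0).contains (pvMemberId b) = false := hpb
      have h1 : k1 a = 0 := by simp [hk1, hpa']
      have h2 : k1 b = 1 := by simp [hk1, hpb']
      rw [h1, h2]
      constructor <;> simp)]
    -- class 0 sorts by the rank key alone
    have hc0 : pvIsort (fun a b => decide (k1 a < k1 b) || (!decide (k1 b < k1 a) && decide (k2 a < k2 b)))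
        (gen.filter p) = pvIsort (fun a b => decide (k2 a < k2 b)) (gen.filter p) := by
      apply pvIsort_congr
      intro a ha b hb
      have hpa' : (pvMkRank R 0).contains (pvMemberId a) = true := (List.mem_filter.mp ha).2
      have hpb' : (pvMkRank R 0).contains (pvMemberId b) = true := (List.mem_filter.mp hb).2
      have h1 : k1 a = 0 := by simp [hk1, hpa']
      have h2 : k1 b = 0 := by simp [hk1, hpb']
      rw [h1, h2]
      simp
    -- class 1 sorts by gender alone
    have hc1 : pvIsort (fun a b => decide (k1 a < k1 b) || (!decide (k1 b < k1 a) && decide (k2 a < k2 b)))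
        (gen.filter (fun a => !p a)) =
        pvIsort (fun a b => decide (pvGenderOrder (pvRoleOf a) < pvGenderOrder (pvRoleOf b)))
          (gen.filter (fun a => !p a)) := by
      apply pvIsort_congr
      intro a ha b hb
      have hpa : p a = false := by
        have := (List.mem_filter.mp ha).2; simpa using this
      have hpb : p b = false := by
        have := (List.mem_filter.mp hb).2; simpa using this
      have hpa' : (pvMkRank R 0).contains (pvMemberId a) = false := hpa
      have hpb' : (pvMkRank R 0).contains (pvMemberId b) = false := hpb
      have h1 : k1 a = 1 := by simp [hk1, hpa']
      have h2 : k1 b = 1 := by simp [hk1, hpb']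
      have hget : ∀ m, p m = false → (pvMkRank R 0).get? (pvMemberId m) = none := by
        intro m hpm
        have := PySem.Dict.contains_eq_isSome_get? (pvMkRank R 0) (pvMemberId m)
        rw [hp] at hpm
        simp only at hpm
        rw [hpm] at this
        cases hg : ((pvMkRank R 0).get? (pvMemberId m))
        · rfl
        · rw [hg] at this; simp at this
      have h3 : k2 a = pvGenderOrder (pvRoleOf a) := by rw [hk2]; simp only [hget a hpa]
      have h4 : k2 b = pvGenderOrder (pvRoleOf b) := by rw [hk2]; simp only [hget b hpb]
      rw [h1, h2, h3, h4]
      simp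
    rw [hc0, hc1]
    rw [← pvSorted_eq_isort, ← pvSorted_eq_isort]
    -- remaining = class 1
    have hrem : gen.filter (fun m => !(PySem.Set.contains R (pvMemberId m))) =
        gen.filter (fun a => !p a) := by
      apply List.filter_congr
      intro m _
      rw [hpdec m, PySem.Set.contains_eq_decide]
    -- class 0 sorted = A's couple list
    have hmap_ids : ys.map pvMemberId = R := pvMapId_filterMap gen P1 R hRgood
    have hlen_ys : ys.length = R.length := by
      have := congrArg List.length hmap_ids
      simpa using this
    have hid_ys : ∀ (j : Nat) (hj : j < ys.length), pvMemberId (ys[j]) = R[j]'(hlen_ys ▸ hj) := by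
      intro j hj
      have := congrArg (fun l => l[j]?) hmap_ids
      simp only [List.getElem?_map] at this
      rw [List.getElem?_eq_getElem hj] at this
      rw [List.getElem?_eq_getElem (hlen_ys ▸ hj)] at this
      simpa using this
    have hys_nodup : ys.Nodup := List.Nodup.of_map pvMemberId (hmap_ids ▸ hRnodup)
    have hpart0_nodup : (gen.filter p).Nodup := by
      have hsub : ((gen.filter p).map pvMemberId).Sublist (gen.map pvMemberId) :=
        List.Sublist.map _ List.filter_sublist
      have hall : ∀ x ∈ (gen.filter p).map pvMemberId, x.isSome = true := by
        intro x hx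
        obtain ⟨m, hm, hxm⟩ := List.mem_map.mp hx
        have hpm : p m = true := (List.mem_filter.mp hm).2
        rw [hpdec m] at hpm
        exact hxm ▸ hRsome (pvMemberId m) (of_decide_eq_true hpm)
      have heq : ((gen.filter p).map pvMemberId).filter Option.isSome =
          (gen.filter p).map pvMemberId := List.filter_eq_self.mpr hall
      have : (((gen.filter p).map pvMemberId).filter Option.isSome).Nodup :=
        List.Nodup.sublist (List.Sublist.filter _ hsub) P1
      rw [heq] at this
      exact List.Nodup.of_map _ this
    have hmemys : ∀ m, m ∈ ys ↔ m ∈ gen.filter p := by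
      intro m
      constructor
      · intro hm
        obtain ⟨i, hi, hf⟩ := List.mem_filterMap.mp hm
        have hmg : m ∈ gen := List.mem_of_find?_eq_some hf
        have hidm : pvMemberId m = i := by simpa using List.find?_some hf
        refine List.mem_filter.mpr ⟨hmg, ?_⟩
        rw [hpdec m, hidm]
        exact decide_eq_true hi
      · intro hm
        obtain ⟨hmg, hpm⟩ := List.mem_filter.mp hm
        rw [hpdec m] at hpm
        have hiR : pvMemberId m ∈ R := of_decide_eq_true hpm
        refine List.mem_filterMap.mpr ⟨pvMemberId m, hiR, ?_⟩
        exact pvFind_eq_of_mem gen P1 m hmg (hRsome _ hiR)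
    have hperm : ys.Perm (gen.filter p) :=
      (List.perm_ext_iff_of_nodup hys_nodup hpart0_nodup).mpr hmemys
    have hk2ys : ∀ (j : Nat) (hj : j < ys.length), k2 (ys[j]) = (j : Int) := by
      intro j hj
      rw [hk2]
      simp only
      rw [hid_ys j hj]
      rw [pvGet?_mkRank_getElem R 0 hRnodup j (hlen_ys ▸ hj)]
      simp
    have hpair : List.Pairwise (fun a b => k2 a < k2 b) ys := by
      rw [List.pairwise_iff_getElem]
      intro a b ha hb hab
      rw [hk2ys a ha, hk2ys b hb]
      exact_mod_cast hab
    rw [PySem.List.sorted_eq_of_perm_of_pairwise_lt (gen.filter p) ys k2 hperm hpair]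
    rw [hrem]

-- the bucketing phases of A produce exactly the per-key filters of B
theorem pvRoleGen_cases (m : PvMember) : pvRoleGen m ∈ pvKeys7 := by
  unfold pvRoleGen
  cases hg : PySem.Dict.get? pvRoleMap (pvRoleOf m) with
  | none => simp [PySem.Dict.getD, hg, pvKeys7]
  | some v =>
    simp only [PySem.Dict.getD, hg, Option.getD_some]
    unfold PySem.Dict.get? at hg
    cases hf : List.find? (fun p => p.1 == pvRoleOf m) pvRoleMap.items with
    | none => rw [hf] at hg; simp at hg
    | some pr =>
      rw [hf] at hg
      simp only [Option.map_some, Option.some.injEq] at hg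
      have hmem := List.mem_of_find?_eq_some hf
      have hit : pvRoleMap.items =
        [("GRANDFATHER", "grandparents"), ("GRANDMOTHER", "grandparents"),
         ("FATHER", "parents"), ("MOTHER", "parents"),
         ("UNCLE", "uncles"), ("AUNT", "uncles"),
         ("SON", "children"), ("DAUGHTER", "children"),
         ("BROTHER", "children"), ("SISTER", "children"),
         ("NEPHEW", "nephews"), ("NIECE", "nephews"),
         ("GRANDSON", "grandchildren"), ("GRANDDAUGHTER", "grandchildren"),
         ("OTHER", "other")] := by rfl
      rw [hit] at hmem
      subst hg
      simp only [List.mem_cons, List.not_mem_nil, or_false] at hmem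
      rcases hmem with h|h|h|h|h|h|h|h|h|h|h|h|h|h|h <;> subst h <;> simp [pvKeys7]

theorem pvPhase1 (ms : List PvMember) (l1 l2 l3 l4 l5 l6 l7 : List PvMember) :
    ms.foldl (fun g member => g.modify (pvRoleGen member) [] (· ++ [member]))
      (PySem.Dict.mk [("grandparents", l1), ("parents", l2), ("uncles", l3), ("children", l4),
        ("nephews", l5), ("grandchildren", l6), ("other", l7)]) =
    PySem.Dict.mk
      [("grandparents", l1 ++ ms.filter (fun m => pvRoleGen m == "grandparents")),
       ("parents", l2 ++ ms.filter (fun m => pvRoleGen m == "parents")),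
       ("uncles", l3 ++ ms.filter (fun m => pvRoleGen m == "uncles")),
       ("children", l4 ++ ms.filter (fun m => pvRoleGen m == "children")),
       ("nephews", l5 ++ ms.filter (fun m => pvRoleGen m == "nephews")),
       ("grandchildren", l6 ++ ms.filter (fun m => pvRoleGen m == "grandchildren")),
       ("other", l7 ++ ms.filter (fun m => pvRoleGen m == "other"))] := by
  induction ms generalizing l1 l2 l3 l4 l5 l6 l7 with
  | nil => simp
  | cons m ms ih =>
    have hk := pvRoleGen_cases m
    simp only [pvKeys7, List.mem_cons, List.not_mem_nil, or_false] at hk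
    simp only [List.foldl_cons]
    rcases hk with h|h|h|h|h|h|h
    · rw [h]
      have hstep : (PySem.Dict.mk [("grandparents", l1), ("parents", l2), ("uncles", l3), ("children", l4), ("nephews", l5), ("grandchildren", l6), ("other", l7)]).modify "grandparents" [] (· ++ [m]) =
          PySem.Dict.mk [("grandparents", l1 ++ [m]), ("parents", l2), ("uncles", l3), ("children", l4), ("nephews", l5), ("grandchildren", l6), ("other", l7)] := by
        simp [PySem.Dict.modify, PySem.Dict.insert, PySem.Dict.contains,
          PySem.Dict.getD, PySem.Dict.get?]
      rw [hstep, ih]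
      simp [h, List.append_assoc]
    · rw [h]
      have hstep : (PySem.Dict.mk [("grandparents", l1), ("parents", l2), ("uncles", l3), ("children", l4), ("nephews", l5), ("grandchildren", l6), ("other", l7)]).modify "parents" [] (· ++ [m]) =
          PySem.Dict.mk [("grandparents", l1), ("parents", l2 ++ [m]), ("uncles", l3), ("children", l4), ("nephews", l5), ("grandchildren", l6), ("other", l7)] := by
        simp [PySem.Dict.modify, PySem.Dict.insert, PySem.Dict.contains,
          PySem.Dict.getD, PySem.Dict.get?]
      rw [hstep, ih]
      simp [h, List.append_assoc]
    · rw [h]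
      have hstep : (PySem.Dict.mk [("grandparents", l1), ("parents", l2), ("uncles", l3), ("children", l4), ("nephews", l5), ("grandchildren", l6), ("other", l7)]).modify "uncles" [] (· ++ [m]) =
          PySem.Dict.mk [("grandparents", l1), ("parents", l2), ("uncles", l3 ++ [m]), ("children", l4), ("nephews", l5), ("grandchildren", l6), ("other", l7)] := by
        simp [PySem.Dict.modify, PySem.Dict.insert, PySem.Dict.contains,
          PySem.Dict.getD, PySem.Dict.get?]
      rw [hstep, ih]
      simp [h, List.append_assoc]
    · rw [h]
      have hstep : (PySem.Dict.mk [("grandparents", l1), ("parents", l2), ("uncles", l3), ("children", l4), ("nephews", l5), ("grandchildren", l6), ("other", l7)]).modify "children" [] (· ++ [m]) =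
          PySem.Dict.mk [("grandparents", l1), ("parents", l2), ("uncles", l3), ("children", l4 ++ [m]), ("nephews", l5), ("grandchildren", l6), ("other", l7)] := by
        simp [PySem.Dict.modify, PySem.Dict.insert, PySem.Dict.contains,
          PySem.Dict.getD, PySem.Dict.get?]
      rw [hstep, ih]
      simp [h, List.append_assoc]
    · rw [h]
      have hstep : (PySem.Dict.mk [("grandparents", l1), ("parents", l2), ("uncles", l3), ("children", l4), ("nephews", l5), ("grandchildren", l6), ("other", l7)]).modify "nephews" [] (· ++ [m]) =
          PySem.Dict.mk [("grandparents", l1), ("parents", l2), ("uncles", l3), ("children", l4), ("nephews", l5 ++ [m]), ("grandchildren", l6), ("other", l7)] := by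
        simp [PySem.Dict.modify, PySem.Dict.insert, PySem.Dict.contains,
          PySem.Dict.getD, PySem.Dict.get?]
      rw [hstep, ih]
      simp [h, List.append_assoc]
    · rw [h]
      have hstep : (PySem.Dict.mk [("grandparents", l1), ("parents", l2), ("uncles", l3), ("children", l4), ("nephews", l5), ("grandchildren", l6), ("other", l7)]).modify "grandchildren" [] (· ++ [m]) =
          PySem.Dict.mk [("grandparents", l1), ("parents", l2), ("uncles", l3), ("children", l4), ("nephews", l5), ("grandchildren", l6 ++ [m]), ("other", l7)] := by
        simp [PySem.Dict.modify, PySem.Dict.insert, PySem.Dict.contains,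
          PySem.Dict.getD, PySem.Dict.get?]
      rw [hstep, ih]
      simp [h, List.append_assoc]
    · rw [h]
      have hstep : (PySem.Dict.mk [("grandparents", l1), ("parents", l2), ("uncles", l3), ("children", l4), ("nephews", l5), ("grandchildren", l6), ("other", l7)]).modify "other" [] (· ++ [m]) =
          PySem.Dict.mk [("grandparents", l1), ("parents", l2), ("uncles", l3), ("children", l4), ("nephews", l5), ("grandchildren", l6), ("other", l7 ++ [m])] := by
        simp [PySem.Dict.modify, PySem.Dict.insert, PySem.Dict.contains,
          PySem.Dict.getD, PySem.Dict.get?]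
      rw [hstep, ih]
      simp [h, List.append_assoc]

theorem pvPhase_eq (members : List (List (String × String))) :
    group_by_generation members =
      pvKeys7.map (fun k =>
        (k, pvSortAsCouples (members.filter (fun m => pvRoleGen m == k)) members)) := by
  have h1 := pvPhase1 members [] [] [] [] [] [] []
  simp only [List.nil_append] at h1
  have h2 : group_by_generation members =
      (((members.foldl (fun g member => g.modify (pvRoleGen member) [] (· ++ [member]))
          (PySem.Dict.mk [("grandparents", ([] : List PvMember)), ("parents", ([] : List PvMember)), ("uncles", ([] : List PvMember)), ("children", ([] : List PvMember)), ("nephews", ([] : List PvMember)), ("grandchildren", ([] : List PvMember)), ("other", ([] : List PvMember))])).keys).foldl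
        (fun g k => g.insert k (pvSortAsCouples (g.getD k []) members))
        (members.foldl (fun g member => g.modify (pvRoleGen member) [] (· ++ [member]))
          (PySem.Dict.mk [("grandparents", ([] : List PvMember)), ("parents", ([] : List PvMember)), ("uncles", ([] : List PvMember)), ("children", ([] : List PvMember)), ("nephews", ([] : List PvMember)), ("grandchildren", ([] : List PvMember)), ("other", ([] : List PvMember))]))).items := rfl
  rw [h2, h1]
  rfl

-- ===== VERDICT (by name: the statement is the Claim_ definition above) =====
theorem group_by_generation_spec : Claim_equal_group_by_generation := by
  intro members _hdom hpre
  unfold Spec_group_by_generation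
  unfold Pre_group_by_generation at hpre
  obtain ⟨hP1, hP2⟩ := hpre
  rw [pvPhase_eq]
  unfold group_by_generation_alt
  apply List.map_congr_left
  intro k _
  have hsub : ((members.filter (fun m => pvRoleGen m == k)).map pvMemberId).Sublist
      (members.map pvMemberId) := List.Sublist.map _ List.filter_sublist
  have P1' : (((members.filter (fun m => pvRoleGen m == k)).map pvMemberId).filter
      Option.isSome).Nodup := List.Nodup.sublist (List.Sublist.filter _ hsub) hP1
  have P2' : ∀ m ∈ members.filter (fun m => pvRoleGen m == k),
      pvGenderOrder (pvRoleOf m) ≠ 3 → (pvMemberId m).isSome = true :=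
    fun m hm h3 => hP2 m (List.mem_filter.mp hm).1 h3
  exact congrArg (Prod.mk k) (pvBucket_eq _ members P1' P2')
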